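-- pv_equiv track=rewrite | github.com/tvillegas98/TP_ALGORITMOS | TP_INTEGRADOR.py | verificar_ciudad
-- ===== SOURCE A (Python) =====
-- def verificar_ciudad(respuesta_json, ciudad, provincia):
--     '''
--         Verifica si la ciuda del usuario está en el archivo JSON entregado
--         por la URL de estado actual, también si el usuario ingresó
--         el nombre de una ciudad incompleta, se verificará las ciudades más similares
--
--         #Parametros
--         respuesta_json(dicc): Diccionarios entregados por la url de estado actual
--         ciudad(str): El nombre de la ciudad del usuario
--         provincia(str): El nombre de la provincia del usuario
--         #Retorno
--         lista(list): Una lista de diccionarios que retorna la ciudad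
--         o las ciudades más similares a la del usuario
--     '''
--     ciudad_encontrada = False
--     lista = []
--     n_dic = 0
--     while ciudad_encontrada == False and n_dic < len(respuesta_json):
--         if ciudad == respuesta_json[n_dic]["name"] and provincia == respuesta_json[n_dic]["province"]:
--             lista = [respuesta_json[n_dic]]
--             ciudad_encontrada = True
--         elif ciudad in respuesta_json[n_dic]['name'] and provincia == respuesta_json[n_dic]["province"]:
--             lista.append(respuesta_json[n_dic])
--         n_dic += 1
--     return lista
-- ===== SOURCE B (Python) =====
-- def verificar_ciudad(respuesta_json, ciudad, provincia):
--     # Pass 1: first exact match wins and discards everything else.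
--     for d in respuesta_json:
--         if ciudad == d["name"] and provincia == d["province"]:
--             return [d]
--     # Pass 2: no exact match anywhere -> all partial matches, in order.
--     return [d for d in respuesta_json
--             if ciudad in d["name"] and provincia == d["province"]]
-- ===== Notes on version B (the rewrite author's own statement) =====
-- stated objective: simpler
-- what changed: A's single while-loop with a found-flag and an accumulator that is overwritten on an exact match is replaced by two clean passes: an early-return scan for the first exact match, then a comprehension over the whole list for partial matches; no flag and no mutated accumulator.
import Mathlib
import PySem

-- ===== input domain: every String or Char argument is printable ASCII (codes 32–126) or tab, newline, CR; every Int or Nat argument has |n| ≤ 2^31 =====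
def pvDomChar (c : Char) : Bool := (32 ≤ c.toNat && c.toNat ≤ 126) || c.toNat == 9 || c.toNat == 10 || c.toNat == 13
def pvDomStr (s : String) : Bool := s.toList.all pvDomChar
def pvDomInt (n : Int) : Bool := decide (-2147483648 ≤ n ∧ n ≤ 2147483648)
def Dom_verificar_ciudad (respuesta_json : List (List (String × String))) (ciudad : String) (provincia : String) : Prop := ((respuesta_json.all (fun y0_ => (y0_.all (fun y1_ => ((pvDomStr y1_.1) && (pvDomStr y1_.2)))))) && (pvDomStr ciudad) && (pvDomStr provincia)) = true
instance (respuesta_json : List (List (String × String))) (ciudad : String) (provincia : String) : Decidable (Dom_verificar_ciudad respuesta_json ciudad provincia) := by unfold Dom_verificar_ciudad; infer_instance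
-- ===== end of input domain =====

-- B replaces A's while-loop with a found-flag and an overwritten accumulator by two plain
-- passes (early-return exact scan, then a filter of partial matches): simpler, same cost.

-- dict value lookup d[k] (first match in the association list); under Pre_ the key is present,
-- so the "" default is never used
def pvGetKey (d : List (String × String)) (k : String) : String :=
  ((d.lookup k).getD "")

-- ===== PORT A =====
-- the while-loop: lista is the mutated accumulator, returning [d] transcribes
-- 'lista = [d]; ciudad_encontrada = True' (the loop stops)
def vcLoopA (ciudad provincia : String) : List (List (String × String)) → List (List (String × String)) → List (List (String × String))
  | [], lista => lista
  | d :: rest, lista =>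
    if ciudad == pvGetKey d "name" && provincia == pvGetKey d "province" then
      [d]
    else if PySem.Str.isIn ciudad (pvGetKey d "name") && provincia == pvGetKey d "province" then
      vcLoopA ciudad provincia rest (lista ++ [d])
    else
      vcLoopA ciudad provincia rest lista

def verificar_ciudad (respuesta_json : List (List (String × String))) (ciudad : String) (provincia : String) : List (List (String × String)) :=
  vcLoopA ciudad provincia respuesta_json []

-- ===== PORT B =====
-- pass 1: first exact match
def vcFindExact (ciudad provincia : String) : List (List (String × String)) → Option (List (String × String))
  | [] => none
  | d :: rest =>
    if ciudad == pvGetKey d "name" && provincia == pvGetKey d "province" then some d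
    else vcFindExact ciudad provincia rest

def verificar_ciudad_alt (respuesta_json : List (List (String × String))) (ciudad : String) (provincia : String) : List (List (String × String)) :=
  match vcFindExact ciudad provincia respuesta_json with
  | some d => [d]
  | none =>
    respuesta_json.filter (fun d =>
      PySem.Str.isIn ciudad (pvGetKey d "name") && provincia == pvGetKey d "province")

-- ===== PRECONDITION & SPEC =====
-- d would raise KeyError when A's loop evaluates its conditions on it
def pvRaisesAt (ciudad : String) (d : List (String × String)) : Bool :=
  (d.lookup "name").isNone || ((d.lookup "province").isNone && PySem.Str.isIn ciudad (pvGetKey d "name"))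

-- d is an exact match (both keys present, name and province equal)
def pvExact (ciudad provincia : String) (d : List (String × String)) : Bool :=
  (d.lookup "name").isSome && (d.lookup "province").isSome &&
    ciudad == pvGetKey d "name" && provincia == pvGetKey d "province"

-- Pre_ excludes exactly the inputs on which A raises KeyError: those where the first dict that
-- either lacks a key A would access ("name", or "province" with ciudad occurring in its name)
-- or matches exactly is NOT an exact match.
def Pre_verificar_ciudad (respuesta_json : List (List (String × String))) (ciudad : String) (provincia : String) : Prop :=
  (respuesta_json.find? (fun d => pvRaisesAt ciudad d || pvExact ciudad provincia d)).all
    (fun d => pvExact ciudad provincia d) = true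
instance (respuesta_json : List (List (String × String))) (ciudad : String) (provincia : String) : Decidable (Pre_verificar_ciudad respuesta_json ciudad provincia) := by unfold Pre_verificar_ciudad; infer_instance

def pvWitness_verificar_ciudad : (List (List (String × String))) × String × String :=
  ([[("name", "Rosario"), ("province", "Santa Fe")], [("name", "Rosario del Tala"), ("province", "Entre Rios")]], "Rosario", "Santa Fe")

def Spec_verificar_ciudad (respuesta_json : List (List (String × String))) (ciudad : String) (provincia : String) (out : List (List (String × String))) : Prop := out = verificar_ciudad_alt respuesta_json ciudad provincia
instance (respuesta_json : List (List (String × String))) (ciudad : String) (provincia : String) (out : List (List (String × String))) : Decidable (Spec_verificar_ciudad respuesta_json ciudad provincia out) := by unfold Spec_verificar_ciudad; infer_instance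

-- ===== CLAIM (what is proved, stated in full; the proofs are below) =====
def Claim_equal_verificar_ciudad : Prop := ∀ (respuesta_json : List (List (String × String))) (ciudad : String) (provincia : String), Dom_verificar_ciudad respuesta_json ciudad provincia → Pre_verificar_ciudad respuesta_json ciudad provincia → Spec_verificar_ciudad respuesta_json ciudad provincia (verificar_ciudad respuesta_json ciudad provincia)

-- ===== LEMMAS AND PROOFS =====

-- loop invariant: A's loop returns the first exact match alone if one exists,
-- otherwise the accumulator followed by all partial matches
theorem vcLoopA_eq (ciudad provincia : String) (rs : List (List (String × String))) :
    ∀ acc, vcLoopA ciudad provincia rs acc =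
      match vcFindExact ciudad provincia rs with
      | some d => [d]
      | none => acc ++ rs.filter (fun d =>
          PySem.Str.isIn ciudad (pvGetKey d "name") && provincia == pvGetKey d "province") := by
  induction rs with
  | nil => intro acc; simp [vcLoopA, vcFindExact]
  | cons d rest ih =>
    intro acc
    by_cases hx : (ciudad == pvGetKey d "name" && provincia == pvGetKey d "province") = true
    · simp [vcLoopA, vcFindExact, hx]
    · by_cases hp : (PySem.Str.isIn ciudad (pvGetKey d "name") && provincia == pvGetKey d "province") = true
      · simp only [PySem.Str.isIn] at hp
        simp [vcLoopA, vcFindExact, hx, hp, ih]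
      · simp only [PySem.Str.isIn] at hp
        simp [vcLoopA, vcFindExact, hx, hp, ih]

-- ===== VERDICT (by name: the statement is the Claim_ definition above) =====
theorem verificar_ciudad_spec : Claim_equal_verificar_ciudad := by
  intro rs c p _ _
  unfold Spec_verificar_ciudad verificar_ciudad verificar_ciudad_alt
  rw [vcLoopA_eq]
  cases vcFindExact c p rs <;> simp
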